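-- pv_equiv track=rewrite | github.com/UoMResearchIT/CommentaryToEpidoc | hyppocratic/CommentaryToEpidoc.py | process_references
-- ===== SOURCE A (Python) =====
-- class StringProcessingException(Exception):
--     pass
--
-- def process_references(text):
--     """
-- This helper function searches a line of text for witness references with the
-- form [WW LL] and returns a string containing the original text with each
-- witness reference replaced with XML with the form
-- <locus target="WW">LL</locus>.
--
-- '\\n' characters are added at the start and end of each XML insertion so each
-- instance of XML is on its own line.
--
-- It is intended this function is called by function process_file() for each line
-- of text from the main body of the text document before processing footnote
-- references using the process_footnotes() function.
--     """
--
--     # Create a string to contain the return value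
--     result = ''
--
--     while True:
--         # Try to partition this line at the first '[' character
--         text_before, sep, text_after = text.partition('[')
--
--         # Note: if sep is zero there are no more witnesses to add
--
--         # Add text_before to the result string
--         if len(text_before) > 0:
--             result += text_before
--             # If there is a witness to add start a new line
--             if len(sep) > 0:
--                 result += '\n'
--
--         # If sep has zero length we can stop because there are no more
--         # witness references
--         if len(sep) == 0:
--             break
--
--         # Try to split text_after at the first ']' character
--         reference, sep, text = text_after.partition(']')
--
--         # If this partition failed then something went wrong, so throw an error
--         if len(sep) == 0:
--             raise StringProcessingException('Unable to partition string at "]" when looking for a reference')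
--
--         # Partition the reference into witness and location (these are
--         # separated by the ' ' character)
--         witness, sep, page = reference.partition(' ')
--
--          # If this partition failed there is an error
--         if len(sep) == 0:
--             raise StringProcessingException('Unable to partition reference {} because missing " " character'.format(reference))
--
--         # Add the witness and location XML to the result string
--         result += '<locus target="' + witness + '">' + page + '</locus>'
--
--         # If text has zero length we can stop
--         if len(text) == 0:
--             break
--         else:
--             # There is more text to process so start a new line
--             result += '\n'
--
--     return result
-- ===== SOURCE B (Python) =====
-- class StringProcessingException(Exception):
--     pass
--
-- def process_references(text):
--     # Split the line at every ']'; every part except the last that contains a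
--     # '[' holds one witness reference (text after the part's first '['), the
--     # other parts are plain text.  Collect plain-text runs and locus strings
--     # as 'pieces' and join them with '\n'.
--     parts = text.split(']')
--     tail = parts.pop()
--     pieces = []
--     buf = ''
--     for part in parts:
--         before, sep, reference = part.partition('[')
--         if not sep:
--             # no reference in this part: it is plain text (with its ']')
--             buf += part + ']'
--         else:
--             buf += before
--             if buf:
--                 pieces.append(buf)
--                 buf = ''
--             witness, sep2, page = reference.partition(' ')
--             if not sep2:
--                 raise StringProcessingException('Unable to partition reference {} because missing " " character'.format(reference))
--             pieces.append('<locus target="' + witness + '">' + page + '</locus>')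
--     if '[' in tail:
--         raise StringProcessingException('Unable to partition string at "]" when looking for a reference')
--     buf += tail
--     if buf:
--         pieces.append(buf)
--     return '\n'.join(pieces)
-- ===== Notes on version B (the rewrite author's own statement) =====
-- stated objective: idiomatic
-- what changed: A's while-loop that repeatedly partitions the remaining text at '[' and ']' while hand-managing '\n' insertions into a growing result string is replaced by one split of the line at ']', a single pass over the parts collecting plain-text runs and locus strings as pieces, and a final '\n'.join.
import Mathlib
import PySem

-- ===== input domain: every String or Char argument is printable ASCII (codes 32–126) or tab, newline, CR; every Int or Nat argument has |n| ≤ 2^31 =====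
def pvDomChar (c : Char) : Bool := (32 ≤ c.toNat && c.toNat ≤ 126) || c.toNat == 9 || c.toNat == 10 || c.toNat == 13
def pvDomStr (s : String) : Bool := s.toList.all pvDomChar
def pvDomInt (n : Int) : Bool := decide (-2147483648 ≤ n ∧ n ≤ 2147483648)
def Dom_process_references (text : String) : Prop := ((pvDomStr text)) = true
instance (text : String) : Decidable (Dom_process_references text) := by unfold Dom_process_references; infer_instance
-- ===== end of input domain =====

-- B replaces A's repeated '[' -partition/consume loop (string accumulator with manual '\n'
-- bookkeeping) by one split at ']' followed by a single pass collecting pieces joined with '\n'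
-- (objective: idiomatic); equivalence is proved on inputs where A raises no exception.

-- ===== PORT A =====
-- Python str.partition(sep) for a single-character separator: (before, found, after)
def pyPartition (c : Char) : List Char → List Char × Bool × List Char
  | [] => ([], false, [])
  | x :: xs =>
    if x = c then ([], true, xs)
    else
      let r := pyPartition c xs
      (x :: r.1, r.2.1, r.2.2)

-- needed by loopA's decreasing_by
theorem pyPartition_decomp (c : Char) (xs : List Char) (h : (pyPartition c xs).2.1 = true) :
    xs = (pyPartition c xs).1 ++ c :: (pyPartition c xs).2.2 := by
  induction xs with
  | nil => simp [pyPartition] at h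
  | cons x xs ih =>
    by_cases hx : x = c
    · simp [pyPartition, hx]
    · simp only [pyPartition, if_neg hx] at h ⊢
      simpa using ih h

-- needed by loopA's decreasing_by
theorem pyPartition_lt (c : Char) (xs : List Char) (h : (pyPartition c xs).2.1 = true) :
    (pyPartition c xs).2.2.length < xs.length := by
  have hd := pyPartition_decomp c xs h
  have : xs.length = (pyPartition c xs).1.length + 1 + (pyPartition c xs).2.2.length := by
    conv_lhs => rw [hd]
    simp; omega
  omega

-- '<locus target="' + witness + '">' + page + '</locus>'  (both Pythons build this string)
def locusXML (wit page : List Char) : List Char :=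
  "<locus target=\"".toList ++ wit ++ "\">".toList ++ page ++ "</locus>".toList

-- A's while-loop; res is A's `result` accumulator.  Where the Python raises
-- StringProcessingException the port returns the accumulated text (such inputs are outside Pre_).
def loopA (res : List Char) (text : List Char) : List Char :=
  let p1 := pyPartition '[' text
  let res1 := if p1.1 = [] then res else (if p1.2.1 then res ++ p1.1 ++ ['\n'] else res ++ p1.1)
  if h1 : p1.2.1 = true then
    let p2 := pyPartition ']' p1.2.2
    if h2 : p2.2.1 = true then
      let p3 := pyPartition ' ' p2.1
      if p3.2.1 = true then
        let res2 := res1 ++ locusXML p3.1 p3.2.2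
        if p2.2.2 = [] then res2 else loopA (res2 ++ ['\n']) p2.2.2
      else res1  -- Python raises here: reference without ' '
    else res1    -- Python raises here: '[' without a following ']'
  else res1
termination_by text.length
decreasing_by
  have h4 := pyPartition_lt '[' text h1
  have h5 := pyPartition_lt ']' (pyPartition '[' text).2.2 h2
  omega

def process_references (text : String) : String := String.mk (loopA [] text.toList)

-- ===== PORT B =====
-- Python `parts = text.split(']'); tail = parts.pop()` for the 1-char separator ']':
-- returns (parts without the last one, last part); hand-ported fuel-free.
def splitInitLast (c : Char) : List Char → List (List Char) × List Char
  | [] => ([], [])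
  | x :: xs =>
    let r := splitInitLast c xs
    if x = c then ([] :: r.1, r.2)
    else
      match r with
      | ([], lst) => ([], x :: lst)
      | (p :: ps, lst) => ((x :: p) :: ps, lst)

-- B's for-loop over the parts; state = (pieces, buf).  Where the Python raises
-- StringProcessingException (reference without ' ') the port stops (outside Pre_).
def bLoop (pieces : List (List Char)) (buf : List Char) : List (List Char) → List (List Char) × List Char
  | [] => (pieces, buf)
  | part :: ps =>
    let p1 := pyPartition '[' part
    if p1.2.1 = false then
      bLoop pieces (buf ++ part ++ [']']) ps
    else
      let buf2 := buf ++ p1.1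
      let pieces2 := if buf2 = [] then pieces else pieces ++ [buf2]
      let p3 := pyPartition ' ' p1.2.2
      if p3.2.1 = false then (pieces2, [])  -- Python raises here: reference without ' '
      else bLoop (pieces2 ++ [locusXML p3.1 p3.2.2]) [] ps

-- '\n'.join(pieces)
def joinNL : List (List Char) → List Char
  | [] => []
  | [p] => p
  | p :: q :: ps => p ++ '\n' :: joinNL (q :: ps)

-- (Source B raises on '[' ∈ tail — outside Pre_; the port simply continues)
def process_references_alt (text : String) : String :=
  let sp := splitInitLast ']' text.toList
  let st := bLoop [] [] sp.1
  let buf2 := st.2 ++ sp.2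
  let pieces := if buf2 = [] then st.1 else st.1 ++ [buf2]
  String.mk (joinNL pieces)

-- ===== PRECONDITION & SPEC =====
-- what follows the first '[' of a part (A's "reference" for the part holding it)
def refTail (p : List Char) : List Char := (p.dropWhile (· ≠ '[')).tail

-- Pre_ excludes exactly the inputs on which the Python A raises StringProcessingException:
-- a '[' after the last ']' (so no ']' closes it), or a reference (first '[' of a ']'-part
-- up to that ']') containing no ' '.
def Pre_process_references (text : String) : Prop :=
  (∀ p ∈ (List.splitOn ']' text.toList).dropLast, '[' ∈ p → ' ' ∈ refTail p) ∧
  '[' ∉ (List.splitOn ']' text.toList).getLastD []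

instance (text : String) : Decidable (Pre_process_references text) := by
  unfold Pre_process_references; infer_instance

def pvWitness_process_references : String := "see [A 12] end"

def Spec_process_references (text : String) (out : String) : Prop := out = process_references_alt text
instance (text : String) (out : String) : Decidable (Spec_process_references text out) := by unfold Spec_process_references; infer_instance

-- ===== CLAIM (what is proved, stated in full; the proofs are below) =====
def Claim_equal_process_references : Prop := ∀ (text : String), Dom_process_references text → Pre_process_references text → Spec_process_references text (process_references text)

-- ===== LEMMAS AND PROOFS =====

theorem pyPartition_of_not_mem (c : Char) (xs : List Char) (h : c ∉ xs) :
    pyPartition c xs = (xs, false, []) := by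
  induction xs with
  | nil => rfl
  | cons x xs ih =>
    simp only [List.mem_cons, not_or] at h
    have hx : ¬ x = c := fun hh => h.1 hh.symm
    simp [pyPartition, hx, ih h.2]

theorem pyPartition_of_append (c : Char) (b a : List Char) (h : c ∉ b) :
    pyPartition c (b ++ c :: a) = (b, true, a) := by
  induction b with
  | nil => simp [pyPartition]
  | cons x xs ih =>
    simp only [List.mem_cons, not_or] at h
    have hx : ¬ x = c := fun hh => h.1 hh.symm
    simp [pyPartition, hx, ih h.2]

theorem exists_decomp_of_mem {c : Char} {xs : List Char} (h : c ∈ xs) :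
    ∃ b a, c ∉ b ∧ xs = b ++ c :: a := by
  induction xs with
  | nil => cases h
  | cons x xs ih =>
    by_cases hx : x = c
    · exact ⟨[], xs, by simp, by simp [hx]⟩
    · have hc : c ∈ xs := by
        rcases List.mem_cons.mp h with h' | h'
        · exact absurd h'.symm hx
        · exact h'
      rcases ih hc with ⟨b, a, hb, he⟩
      refine ⟨x :: b, a, ?_, by simp [he]⟩
      simp only [List.mem_cons, not_or]
      exact ⟨fun hh => hx hh.symm, hb⟩

theorem splitInitLast_of_not_mem (c : Char) (xs : List Char) (h : c ∉ xs) :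
    splitInitLast c xs = ([], xs) := by
  induction xs with
  | nil => rfl
  | cons x xs ih =>
    simp only [List.mem_cons, not_or] at h
    have hx : ¬ x = c := fun hh => h.1 hh.symm
    simp [splitInitLast, hx, ih h.2]

theorem splitInitLast_append_right (c : Char) (xs ys : List Char) (h : c ∉ ys) :
    splitInitLast c (xs ++ ys) = ((splitInitLast c xs).1, (splitInitLast c xs).2 ++ ys) := by
  induction xs with
  | nil => simp [splitInitLast_of_not_mem c ys h, splitInitLast]
  | cons x xs ih =>
    by_cases hx : x = c
    · simp [splitInitLast, hx, ih]
    · simp only [List.cons_append, splitInitLast, if_neg hx, ih]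
      rcases hsp : splitInitLast c xs with ⟨ps, lst⟩
      cases ps <;> simp

theorem splitInitLast_append_sep (c : Char) (xs ys : List Char) :
    splitInitLast c (xs ++ c :: ys) =
      ((splitInitLast c xs).1 ++ (splitInitLast c xs).2 :: (splitInitLast c ys).1,
       (splitInitLast c ys).2) := by
  induction xs with
  | nil => simp [splitInitLast]
  | cons x xs ih =>
    by_cases hx : x = c
    · simp [splitInitLast, hx, ih]
    · simp only [List.cons_append, splitInitLast, if_neg hx, ih]
      rcases hsp : splitInitLast c xs with ⟨ps, lst⟩
      cases ps <;> simp

-- proof-only: concatenation of the init parts with their ']' separators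
def flatParts : List (List Char) → List Char
  | [] => []
  | p :: ps => p ++ ']' :: flatParts ps

theorem flatParts_splitInitLast (xs : List Char) :
    flatParts (splitInitLast ']' xs).1 ++ (splitInitLast ']' xs).2 = xs := by
  induction xs with
  | nil => rfl
  | cons x xs ih =>
    by_cases hx : x = ']'
    · simp [splitInitLast, hx, flatParts, ih]
    · simp only [splitInitLast, if_neg hx]
      rcases hsp : splitInitLast ']' xs with ⟨ps, lst⟩
      rw [hsp] at ih
      cases ps with
      | nil => simpa [flatParts] using ih
      | cons p ps' => simp only [flatParts] at ih ⊢; simp_all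

theorem mem_of_mem_flatParts {a : Char} {p : List Char} {ps : List (List Char)}
    (hp : p ∈ ps) (ha : a ∈ p) : a ∈ flatParts ps := by
  induction ps with
  | nil => cases hp
  | cons q qs ih =>
    rcases List.mem_cons.mp hp with hp' | hp'
    · subst hp'; simp [flatParts, ha]
    · simp [flatParts, ih hp']

theorem mem_of_mem_init {a : Char} {p : List Char} {xs : List Char}
    (hp : p ∈ (splitInitLast ']' xs).1) (ha : a ∈ p) : a ∈ xs := by
  have := flatParts_splitInitLast xs
  rw [← this]
  exact List.mem_append_left _ (mem_of_mem_flatParts hp ha)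

theorem refTail_eq (x y : List Char) (h : '[' ∉ x) : refTail (x ++ '[' :: y) = y := by
  induction x with
  | nil => simp [refTail, List.dropWhile]
  | cons a as ih =>
    simp only [List.mem_cons, not_or] at h
    have := ih h.2
    simp only [refTail] at this ⊢
    have ha : ¬ a = '[' := fun hh => h.1 hh.symm
    rw [List.cons_append, List.dropWhile_cons,
      if_pos (show decide (a ≠ '[') = true by simp [ha])]
    exact this

-- A's `result` at the start of a loop iteration, as a function of B's pieces
def gAcc (pieces : List (List Char)) : List Char :=
  if pieces = [] then [] else joinNL pieces ++ ['\n']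

theorem joinNL_append_singleton (ps : List (List Char)) (x : List Char) :
    joinNL (ps ++ [x]) = gAcc ps ++ x := by
  induction ps with
  | nil => simp [joinNL, gAcc]
  | cons p ps ih =>
    cases ps with
    | nil => simp [joinNL, gAcc]
    | cons q qs =>
      have h1 : joinNL (p :: ((q :: qs) ++ [x])) = p ++ '\n' :: joinNL ((q :: qs) ++ [x]) := rfl
      rw [List.cons_append, h1, ih]
      simp [gAcc, joinNL]

theorem bLoop_no_bracket (ps qs : List (List Char)) (pieces : List (List Char)) (buf : List Char)
    (h : ∀ p ∈ ps, '[' ∉ p) :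
    bLoop pieces buf (ps ++ qs) = bLoop pieces (buf ++ flatParts ps) qs := by
  induction ps generalizing buf with
  | nil => simp [flatParts]
  | cons p ps ih =>
    have hp : pyPartition '[' p = (p, false, []) :=
      pyPartition_of_not_mem _ _ (h p (by simp))
    simp only [List.cons_append, bLoop, hp]
    simpa [flatParts] using ih (buf ++ p ++ [']']) (fun q hq => h q (by simp [hq]))

theorem loopA_no_bracket (res rest : List Char) (h : '[' ∉ rest) :
    loopA res rest = if rest = [] then res else res ++ rest := by
  rw [loopA]
  simp [pyPartition_of_not_mem '[' rest h]

theorem loopA_ref (res before wit page rest : List Char)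
    (hb : '[' ∉ before) (hr : ']' ∉ wit ++ ' ' :: page) (hw : ' ' ∉ wit) :
    loopA res (before ++ '[' :: ((wit ++ ' ' :: page) ++ ']' :: rest)) =
      (if rest = []
       then (if before = [] then res else res ++ before ++ ['\n']) ++ locusXML wit page
       else loopA ((if before = [] then res else res ++ before ++ ['\n']) ++ locusXML wit page ++ ['\n']) rest) := by
  rw [loopA]
  simp only [pyPartition_of_append '[' before _ hb,
    pyPartition_of_append ']' (wit ++ ' ' :: page) rest hr,
    pyPartition_of_append ' ' wit page hw]
  split_ifs <;> simp_all

theorem mem_of_mem_last {a : Char} {xs : List Char}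
    (h : a ∈ (splitInitLast ']' xs).2) : a ∈ xs := by
  rw [← flatParts_splitInitLast xs]
  exact List.mem_append_right _ h

theorem gAcc_append_singleton (ps : List (List Char)) (x : List Char) :
    gAcc (ps ++ [x]) = gAcc ps ++ x ++ ['\n'] := by
  have hne : ps ++ [x] ≠ [] := by simp
  rw [gAcc, if_neg hne, joinNL_append_singleton]

-- Main loop correspondence, strong induction on the length of the remaining text.
theorem mainLoop : ∀ (n : Nat) (rest : List Char) (pieces : List (List Char)),
    rest.length ≤ n → rest ≠ [] →
    (∀ p ∈ (splitInitLast ']' rest).1, '[' ∈ p → ' ' ∈ refTail p) →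
    '[' ∉ (splitInitLast ']' rest).2 →
    loopA (gAcc pieces) rest =
      joinNL
        (if (bLoop pieces [] (splitInitLast ']' rest).1).2 ++ (splitInitLast ']' rest).2 = []
         then (bLoop pieces [] (splitInitLast ']' rest).1).1
         else (bLoop pieces [] (splitInitLast ']' rest).1).1 ++
              [(bLoop pieces [] (splitInitLast ']' rest).1).2 ++ (splitInitLast ']' rest).2]) := by
  intro n
  induction n with
  | zero =>
    intro rest pieces hlen hne
    cases rest with
    | nil => exact absurd rfl hne
    | cons x xs => simp at hlen
  | succ n ih =>
    intro rest pieces hlen hne hcond htail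
    by_cases hmem : '[' ∈ rest
    case neg =>
      -- no witness reference left: A copies the text, B has only plain parts
      rw [loopA_no_bracket _ _ hmem, if_neg hne]
      have hparts : ∀ p ∈ (splitInitLast ']' rest).1, '[' ∉ p :=
        fun p hp ha => hmem (mem_of_mem_init hp ha)
      have hb := bLoop_no_bracket (splitInitLast ']' rest).1 [] pieces [] hparts
      rw [List.append_nil] at hb
      rw [hb]
      simp only [bLoop, List.nil_append, List.append_assoc]
      rw [flatParts_splitInitLast]
      rw [if_neg hne, joinNL_append_singleton]
    case pos =>
      obtain ⟨b1, a1, hb1, hdec⟩ := exists_decomp_of_mem hmem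
      by_cases hmem2 : ']' ∈ a1
      case neg =>
        -- '[' after the last ']': excluded by the hypothesis on the last part
        exfalso
        have hsp : splitInitLast ']' rest =
            ((splitInitLast ']' b1).1, (splitInitLast ']' b1).2 ++ '[' :: a1) := by
          rw [hdec]
          exact splitInitLast_append_right ']' b1 ('[' :: a1)
            (by simp only [List.mem_cons, not_or]; exact ⟨by decide, hmem2⟩)
        apply htail
        rw [hsp]
        simp
      case pos =>
        obtain ⟨ref, rest2, hr, hdec2⟩ := exists_decomp_of_mem hmem2
        subst hdec2
        subst hdec
        -- rest = b1 ++ '[' :: (ref ++ ']' :: rest2)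
        have hre : b1 ++ '[' :: (ref ++ ']' :: rest2) = (b1 ++ '[' :: ref) ++ ']' :: rest2 := by
          simp
        have hsp : splitInitLast ']' (b1 ++ '[' :: (ref ++ ']' :: rest2)) =
            ((splitInitLast ']' b1).1 ++
               ((splitInitLast ']' b1).2 ++ '[' :: ref) :: (splitInitLast ']' rest2).1,
             (splitInitLast ']' rest2).2) := by
          rw [hre, splitInitLast_append_sep,
            splitInitLast_append_right ']' b1 ('[' :: ref)
              (by simp only [List.mem_cons, not_or]; exact ⟨by decide, hr⟩)]
        have hLb : '[' ∉ (splitInitLast ']' b1).2 := fun ha => hb1 (mem_of_mem_last ha)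
        have hIb : ∀ p ∈ (splitInitLast ']' b1).1, '[' ∉ p :=
          fun p hp ha => hb1 (mem_of_mem_init hp ha)
        have hmid : ' ' ∈ ref := by
          have hpmem : ((splitInitLast ']' b1).2 ++ '[' :: ref) ∈
              (splitInitLast ']' (b1 ++ '[' :: (ref ++ ']' :: rest2))).1 := by
            rw [hsp]; simp
          have := hcond _ hpmem (by simp)
          rwa [refTail_eq _ _ hLb] at this
        obtain ⟨wit, page, hw, hrefdec⟩ := exists_decomp_of_mem hmid
        subst hrefdec
        -- A's step
        have hA := loopA_ref (gAcc pieces) b1 wit page rest2 hb1 hr hw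
        -- B's step: bLoop runs through the plain parts of b1, then the reference part
        have hBstep : bLoop pieces []
              (splitInitLast ']' (b1 ++ '[' :: ((wit ++ ' ' :: page) ++ ']' :: rest2))).1 =
            bLoop ((if b1 = [] then pieces else pieces ++ [b1]) ++
                [locusXML wit page]) [] (splitInitLast ']' rest2).1 := by
          rw [hsp]
          rw [bLoop_no_bracket _ _ pieces [] hIb]
          simp only [bLoop, List.nil_append]
          rw [pyPartition_of_append '[' ((splitInitLast ']' b1).2) (wit ++ ' ' :: page) hLb]
          simp only [Bool.true_eq_false, if_false, ← List.append_assoc]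
          rw [flatParts_splitInitLast b1]
          rw [pyPartition_of_append ' ' wit page hw]
          simp
        -- putting the two steps together
        have hjpc : joinNL ((if b1 = [] then pieces else pieces ++ [b1]) ++ [locusXML wit page]) =
            (if b1 = [] then gAcc pieces else gAcc pieces ++ b1 ++ ['\n']) ++ locusXML wit page := by
          rw [joinNL_append_singleton]
          by_cases hb : b1 = []
          · simp [hb]
          · rw [if_neg hb, if_neg hb, gAcc_append_singleton]
        have hgpc : gAcc ((if b1 = [] then pieces else pieces ++ [b1]) ++ [locusXML wit page]) =
            ((if b1 = [] then gAcc pieces else gAcc pieces ++ b1 ++ ['\n']) ++ locusXML wit page)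
              ++ ['\n'] := by
          rw [gAcc, if_neg (by simp), hjpc]
        simp only [List.append_assoc, List.cons_append] at hA hBstep hsp hjpc hgpc hcond htail ⊢
        rw [hA, hBstep, hsp]
        by_cases hrest2 : rest2 = []
        · subst hrest2
          rw [if_pos rfl]
          simpa [splitInitLast, bLoop] using hjpc.symm
        · rw [if_neg hrest2, ← hgpc]
          have hlen2 : rest2.length ≤ n := by
            simp only [List.length_append, List.length_cons] at hlen
            omega
          have hcond2 : ∀ p ∈ (splitInitLast ']' rest2).1, '[' ∈ p → ' ' ∈ refTail p := by
            intro p hp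
            refine hcond p ?_
            rw [hsp]
            simp [hp]
          have htail2 : '[' ∉ (splitInitLast ']' rest2).2 := by
            rw [hsp] at htail
            simpa using htail
          exact ih rest2 _ hlen2 hrest2 hcond2 htail2

theorem splitOn_eq_splitInitLast (xs : List Char) :
    List.splitOn ']' xs = (splitInitLast ']' xs).1 ++ [(splitInitLast ']' xs).2] := by
  induction xs with
  | nil => simp [List.splitOn, List.splitOnP_nil, splitInitLast]
  | cons x xs ih =>
    by_cases hx : x = ']'
    · rw [show List.splitOn ']' (x :: xs) = [] :: List.splitOn ']' xs by
        simp [List.splitOn, List.splitOnP_cons, hx]]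
      simp [splitInitLast, hx, ih]
    · rw [show List.splitOn ']' (x :: xs) = List.modifyHead (List.cons x) (List.splitOn ']' xs) by
        simp [List.splitOn, List.splitOnP_cons, hx]]
      rw [ih]
      simp only [splitInitLast, if_neg hx]
      rcases hsp : splitInitLast ']' xs with ⟨ps, lst⟩
      cases ps <;> simp

-- ===== VERDICT (by name: the statement is the Claim_ definition above) =====
theorem process_references_spec : Claim_equal_process_references := by
  unfold Claim_equal_process_references
  intro text _ hpre
  obtain ⟨h1, h2⟩ := hpre
  rw [splitOn_eq_splitInitLast, List.dropLast_concat] at h1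
  rw [splitOn_eq_splitInitLast, List.getLastD_concat] at h2
  unfold Spec_process_references process_references process_references_alt
  by_cases hl : text.toList = []
  · rw [hl] at h1 h2 ⊢
    rw [loopA_no_bracket _ _ (by simp)]
    simp [splitInitLast, bLoop, joinNL]
  · have hm := mainLoop text.toList.length text.toList [] le_rfl hl h1 h2
    have hg : gAcc [] = [] := by simp [gAcc]
    rw [hg] at hm
    rw [hm]
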